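-- pv_equiv track=rewrite | github.com/pocketkk/TheProgram | backend/app/api/routes/sudoku.py | _generate_astrological_theme
-- ===== SOURCE A (Python) =====
-- def _generate_astrological_theme(aspects: list) -> str:
--     """Generate a theme description based on the aspects"""
--     if not aspects:
--         return "A day of quiet celestial energy invites focused contemplation."
--
--     themes = []
--
--     # Count aspect types
--     conjunctions = sum(1 for a in aspects if a.get('aspect') == 'conjunction')
--     oppositions = sum(1 for a in aspects if a.get('aspect') == 'opposition')
--     trines = sum(1 for a in aspects if a.get('aspect') == 'trine')
--     squares = sum(1 for a in aspects if a.get('aspect') == 'square')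
--
--     if conjunctions > 2:
--         themes.append("powerful merging of energies")
--     if oppositions > 1:
--         themes.append("balancing opposing forces")
--     if trines > 2:
--         themes.append("flowing harmonious energy")
--     if squares > 2:
--         themes.append("dynamic tension requiring action")
--
--     # Check for significant planet involvement
--     outer_involved = any(
--         a.get('transit_planet') in ['Pluto', 'Neptune', 'Uranus']
--         for a in aspects if a.get('significance') in ['major', 'significant']
--     )
--     if outer_involved:
--         themes.append("transformative outer planet influences")
--
--     if not themes:
--         themes = ["subtle celestial guidance"]
--
--     return f"Today's puzzle reflects {', '.join(themes)}. " \
--            f"The variant constraints emerge from the cosmic patterns above."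
-- ===== SOURCE B (Python) =====
-- def _generate_astrological_theme(aspects: list) -> str:
--     """Generate a theme description based on the aspects"""
--     if not aspects:
--         return "A day of quiet celestial energy invites focused contemplation."
--
--     # One pass: tabulate aspect-type counts and the outer-planet flag together.
--     counts = {}
--     outer_involved = False
--     for a in aspects:
--         asp = a.get('aspect')
--         counts[asp] = counts.get(asp, 0) + 1
--         if a.get('significance') in ('major', 'significant') and \
--            a.get('transit_planet') in ('Pluto', 'Neptune', 'Uranus'):
--             outer_involved = True
--
--     # Read the thresholds off the table.
--     themes = []
--     if counts.get('conjunction', 0) > 2: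
--         themes.append("powerful merging of energies")
--     if counts.get('opposition', 0) > 1:
--         themes.append("balancing opposing forces")
--     if counts.get('trine', 0) > 2:
--         themes.append("flowing harmonious energy")
--     if counts.get('square', 0) > 2:
--         themes.append("dynamic tension requiring action")
--     if outer_involved:
--         themes.append("transformative outer planet influences")
--
--     if not themes:
--         themes = ["subtle celestial guidance"]
--
--     return "Today's puzzle reflects " + ", ".join(themes) + ". " \
--            "The variant constraints emerge from the cosmic patterns above."
-- ===== Notes on version B (the rewrite author's own statement) =====
-- stated objective: simpler
-- what changed: Replaces four separate counting scans plus a separate any-scan with one pass that builds a count table and the outer-planet flag together, then reads the thresholds off the table.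
import Mathlib
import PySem

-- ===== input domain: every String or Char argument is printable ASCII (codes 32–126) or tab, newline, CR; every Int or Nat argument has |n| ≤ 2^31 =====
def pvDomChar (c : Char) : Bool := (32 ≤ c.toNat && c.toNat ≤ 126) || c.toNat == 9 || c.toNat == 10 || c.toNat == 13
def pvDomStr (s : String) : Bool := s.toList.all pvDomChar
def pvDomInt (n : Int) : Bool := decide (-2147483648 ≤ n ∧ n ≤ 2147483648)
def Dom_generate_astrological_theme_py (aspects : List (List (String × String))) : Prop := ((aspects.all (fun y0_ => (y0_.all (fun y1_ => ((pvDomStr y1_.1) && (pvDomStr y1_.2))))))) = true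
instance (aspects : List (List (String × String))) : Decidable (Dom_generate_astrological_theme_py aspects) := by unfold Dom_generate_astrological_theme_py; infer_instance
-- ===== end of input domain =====

-- B builds the aspect-type count table and the outer-planet flag in ONE pass and reads thresholds off the table (simpler decomposition; same output).


-- ===== PORT A =====
-- get = Python dict.get: first match in the association list, None if absent
def pyAGet (a : List (String × String)) (k : String) : Option String :=
  (PySem.Dict.mk a).get? k

def pvOuterPred (a : List (String × String)) : Bool :=
  ([some "major", some "significant"].contains (pyAGet a "significance")) &&
  ([some "Pluto", some "Neptune", some "Uranus"].contains (pyAGet a "transit_planet"))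

def pvTail : String := ". The variant constraints emerge from the cosmic patterns above."

def generate_astrological_theme_py (aspects : List (List (String × String))) : String :=
  if aspects = [] then
    "A day of quiet celestial energy invites focused contemplation."
  else
    let conjunctions : Int := aspects.foldl (fun acc a => if pyAGet a "aspect" == some "conjunction" then acc + 1 else acc) 0
    let oppositions : Int := aspects.foldl (fun acc a => if pyAGet a "aspect" == some "opposition" then acc + 1 else acc) 0
    let trines : Int := aspects.foldl (fun acc a => if pyAGet a "aspect" == some "trine" then acc + 1 else acc) 0
    let squares : Int := aspects.foldl (fun acc a => if pyAGet a "aspect" == some "square" then acc + 1 else acc) 0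
    let themes : List String := []
    let themes := if conjunctions > 2 then themes ++ ["powerful merging of energies"] else themes
    let themes := if oppositions > 1 then themes ++ ["balancing opposing forces"] else themes
    let themes := if trines > 2 then themes ++ ["flowing harmonious energy"] else themes
    let themes := if squares > 2 then themes ++ ["dynamic tension requiring action"] else themes
    let outer_involved : Bool := aspects.any pvOuterPred
    let themes := if outer_involved then themes ++ ["transformative outer planet influences"] else themes
    let themes := if themes = [] then ["subtle celestial guidance"] else themes
    "Today's puzzle reflects " ++ PySem.Str.join ", " themes ++ pvTail


-- ===== PORT B =====
-- B: one pass builds (count table, outer flag); thresholds are then read off the table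
def pvTabulate (aspects : List (List (String × String))) :
    PySem.Dict (Option String) Int × Bool :=
  aspects.foldl
    (fun st a =>
      (st.1.insert (pyAGet a "aspect") (st.1.getD (pyAGet a "aspect") 0 + 1),
       st.2 || pvOuterPred a))
    (PySem.Dict.empty, false)

def generate_astrological_theme_py_alt (aspects : List (List (String × String))) : String :=
  if aspects = [] then
    "A day of quiet celestial energy invites focused contemplation."
  else
    let st := pvTabulate aspects
    let counts := st.1
    let themes : List String := []
    let themes := if counts.getD (some "conjunction") 0 > 2 then themes ++ ["powerful merging of energies"] else themes
    let themes := if counts.getD (some "opposition") 0 > 1 then themes ++ ["balancing opposing forces"] else themes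
    let themes := if counts.getD (some "trine") 0 > 2 then themes ++ ["flowing harmonious energy"] else themes
    let themes := if counts.getD (some "square") 0 > 2 then themes ++ ["dynamic tension requiring action"] else themes
    let themes := if st.2 then themes ++ ["transformative outer planet influences"] else themes
    let themes := if themes = [] then ["subtle celestial guidance"] else themes
    "Today's puzzle reflects " ++ PySem.Str.join ", " themes ++ pvTail


-- ===== PRECONDITION & SPEC =====
def Spec_generate_astrological_theme_py (aspects : List (List (String × String))) (out : String) : Prop := out = generate_astrological_theme_py_alt aspects
instance (aspects : List (List (String × String))) (out : String) : Decidable (Spec_generate_astrological_theme_py aspects out) := by unfold Spec_generate_astrological_theme_py; infer_instance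

-- ===== CLAIM (what is proved, stated in full; the proofs are below) =====
def Claim_equal_generate_astrological_theme_py : Prop := ∀ (aspects : List (List (String × String))), Dom_generate_astrological_theme_py aspects → Spec_generate_astrological_theme_py aspects (generate_astrological_theme_py aspects)

-- ===== LEMMAS AND PROOFS =====
theorem pvPairFoldl (l : List (List (String × String)))
    (d : PySem.Dict (Option String) Int) (b : Bool) :
    l.foldl
      (fun st a =>
        (st.1.insert (pyAGet a "aspect") (st.1.getD (pyAGet a "aspect") 0 + 1),
         st.2 || pvOuterPred a)) (d, b) =
    (l.foldl (fun d a => d.insert (pyAGet a "aspect") (d.getD (pyAGet a "aspect") 0 + 1)) d,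
     b || l.any pvOuterPred) := by
  induction l generalizing d b with
  | nil => simp
  | cons h t ih => simp [List.foldl_cons, ih, Bool.or_assoc]

theorem pvTabulate_eq (aspects : List (List (String × String))) :
    pvTabulate aspects =
      ((aspects.map (fun a => pyAGet a "aspect")).foldl
        (fun d x => d.insert x (d.getD x 0 + 1)) PySem.Dict.empty,
       aspects.any pvOuterPred) := by
  unfold pvTabulate
  rw [pvPairFoldl, List.foldl_map]
  simp

-- ===== VERDICT (by name: the statement is the Claim_ definition above) =====
theorem generate_astrological_theme_py_spec : Claim_equal_generate_astrological_theme_py := by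
  intro aspects _
  unfold Spec_generate_astrological_theme_py
  unfold generate_astrological_theme_py generate_astrological_theme_py_alt
  by_cases h : aspects = []
  · simp [h]
  · simp only [h, if_false]
    rw [pvTabulate_eq]
    simp only [PySem.Dict.getD_foldl_insert_add_one, PySem.Dict.getD_empty,
      PySem.List.foldl_if_add_one, List.count_eq_countP, List.countP_map, Function.comp_def]
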